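-- pv_equiv track=rewrite | github.com/pisohaka/algoritms | lesson1/odometer.py | odometer
-- ===== SOURCE A (Python) =====
-- def odometer(oksana) -> int:
--     speed = oksana[0:][::2]
--     time = oksana[1:][::2]
--     distance = 0
--     for i in range(len(speed)):
--         if i == 0:
--             distance = distance + speed[i] * time[i]
--         else:
--             distance = distance + speed[i] * (time[i] - time[i-1])
--     return distance
-- ===== SOURCE B (Python) =====
-- def odometer(oksana) -> int:
--     # Summation by parts: instead of multiplying each speed by a time-delta,
--     # multiply each time by the drop in speed to the next segment (0 after the last).
--     speed = oksana[0::2]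
--     time = oksana[1::2]
--     total = 0
--     for j, t in enumerate(time):
--         nxt = speed[j + 1] if j + 1 < len(speed) else 0
--         total += t * (speed[j] - nxt)
--     return total
-- ===== Notes on version B (the rewrite author's own statement) =====
-- stated objective: alternative
-- what changed: A accumulates speed[i] times a time-delta (with an i==0 special case); B uses summation by parts: it multiplies each time value by the drop in speed to the next segment (0 after the last), a telescoped form of the same sum.
import Mathlib
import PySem

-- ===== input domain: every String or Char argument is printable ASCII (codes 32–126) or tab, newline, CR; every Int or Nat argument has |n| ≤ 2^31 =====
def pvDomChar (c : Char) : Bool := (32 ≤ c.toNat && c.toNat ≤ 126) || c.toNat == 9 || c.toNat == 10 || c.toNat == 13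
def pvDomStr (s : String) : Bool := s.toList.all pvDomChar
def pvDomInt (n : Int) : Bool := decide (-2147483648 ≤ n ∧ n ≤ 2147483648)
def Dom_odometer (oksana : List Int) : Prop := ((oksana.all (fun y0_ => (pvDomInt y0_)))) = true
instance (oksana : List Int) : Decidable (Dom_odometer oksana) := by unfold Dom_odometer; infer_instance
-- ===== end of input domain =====

-- B replaces A's speed-times-time-delta accumulation by summation by parts: each time value
-- is multiplied by the drop in speed to the next segment (0 after the last); proved equal by a
-- telescoping lemma.


-- ===== PORT A =====
def odometer (oksana : List Int) : Int :=
  let speed := (PySem.List.slice? (PySem.List.slice oksana (some 0) none) none none 2).getD []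
  let time := (PySem.List.slice? (PySem.List.slice oksana (some 1) none) none none 2).getD []
  (PySem.List.pyRange 0 (speed.length : Int) 1).foldl
    (fun distance i =>
      if i = 0 then
        distance + PySem.List.pyGetD speed i 0 * PySem.List.pyGetD time i 0
      else
        distance + PySem.List.pyGetD speed i 0 *
          (PySem.List.pyGetD time i 0 - PySem.List.pyGetD time (i - 1) 0)) 0

-- ===== PORT B =====
-- 'nxt = speed[j+1] if j+1 < len(speed) else 0; total += t * (speed[j] - nxt)' (nxt inlined)
def odometer_alt (oksana : List Int) : Int :=
  let speed := (PySem.List.slice? oksana (some 0) none 2).getD []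
  let time := (PySem.List.slice? oksana (some 1) none 2).getD []
  (PySem.List.enumerate time).foldl
    (fun total p =>
      total + p.2 * (PySem.List.pyGetD speed p.1 0 -
        (if p.1 + 1 < (speed.length : Int) then PySem.List.pyGetD speed (p.1 + 1) 0 else 0))) 0

-- ===== PRECONDITION & SPEC =====
-- Pre_ admits exactly the inputs on which Python A returns: on an odd-length list the
-- last iteration's time[i] raises IndexError.
def Pre_odometer (oksana : List Int) : Prop := oksana.length % 2 = 0
instance (oksana : List Int) : Decidable (Pre_odometer oksana) := by unfold Pre_odometer; infer_instance
def pvWitness_odometer : List Int := [3, 10, 4, 15]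
def Spec_odometer (oksana : List Int) (out : Int) : Prop := out = odometer_alt oksana
instance (oksana : List Int) (out : Int) : Decidable (Spec_odometer oksana out) := by unfold Spec_odometer; infer_instance

-- ===== CLAIM (what is proved, stated in full; the proofs are below) =====
def Claim_equal_odometer : Prop := ∀ (oksana : List Int), Dom_odometer oksana → Pre_odometer oksana → Spec_odometer oksana (odometer oksana)

-- ===== LEMMAS AND PROOFS =====

-- A's speed slice xs[0:][::2] and B's xs[0::2] denote the same list.
theorem slice2_zero_eq (xs : List Int) :
    PySem.List.slice? (PySem.List.slice xs (some 0) none) none none 2 =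
      PySem.List.slice? xs (some 0) none 2 := by
  rw [PySem.List.slice_from xs (a := 0) (by omega)]
  simp [PySem.List.slice?, PySem.List.sliceIndices]

-- A's time slice xs[1:][::2] and B's xs[1::2] denote the same list.
theorem slice2_one_eq (xs : List Int) :
    PySem.List.slice? (PySem.List.slice xs (some 1) none) none none 2 =
      PySem.List.slice? xs (some 1) none 2 := by
  rw [PySem.List.slice_from xs (a := 1) (by omega)]
  cases xs with
  | nil => rfl
  | cons a t =>
    show PySem.List.slice? t none none 2 = PySem.List.slice? (a :: t) (some 1) none 2
    simp [PySem.List.slice?, PySem.List.sliceIndices]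
    congr 1
    funext x
    have h1 : ((1 : Int) + 2 * (x : Int)).toNat = 2 * x + 1 := by omega
    have h2 : ((2 : Int) * (x : Int)).toNat = 2 * x := by omega
    rw [h1, h2, List.getElem?_cons_succ]

-- xs[0::2] of (a :: b :: r) is a :: r[0::2].
theorem sliceE_cons (a b : Int) (xs : List Int) :
    (PySem.List.slice? (a :: b :: xs) (some 0) none 2).getD [] =
      a :: (PySem.List.slice? xs (some 0) none 2).getD [] := by
  simp only [PySem.List.slice?, PySem.List.sliceIndices]
  norm_num
  have hmin : min (0:Int) (↑xs.length + 1 + 1) = 0 := by omega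
  rw [hmin]
  have hc : ((↑xs.length + 1 + 1 - 0 + 2 - 1) / 2 : Int).toNat =
      (if 0 < xs.length then ((↑xs.length + 2 - 1 : Int) / 2).toNat else 0) + 1 := by
    split_ifs with h0 <;> omega
  rw [hc, if_pos (by omega : (0:Int) ≤ ↑xs.length + 1), List.range_succ_eq_map,
    List.filterMap_cons, List.filterMap_map]
  norm_num
  congr 1

-- xs[1::2] of (a :: b :: r) is b :: r[1::2].
theorem sliceO_cons (a b : Int) (xs : List Int) :
    (PySem.List.slice? (a :: b :: xs) (some 1) none 2).getD [] =
      b :: (PySem.List.slice? xs (some 1) none 2).getD [] := by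
  cases xs with
  | nil => simp [PySem.List.slice?, PySem.List.sliceIndices]
  | cons c r =>
    simp only [PySem.List.slice?, PySem.List.sliceIndices]
    norm_num
    have hm1 : min (1:Int) (↑r.length + 1 + 1 + 1) = 1 := by omega
    rw [hm1, if_pos (by omega : (0:Int) ≤ ↑r.length + 1)]
    have hc : ((↑r.length + 1 + 1 + 1 - 1 + 2 - 1) / 2 : Int).toNat =
        (if 0 < r.length then ((↑r.length + 2 - 1 : Int) / 2).toNat else 0) + 1 := by
      split_ifs with h0 <;> omega
    rw [hc, List.range_succ_eq_map, List.filterMap_cons, List.filterMap_map]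
    norm_num
    congr 1

-- pair-structured induction helper
def pairsInd : List Int → Nat
  | [] => 0
  | [_] => 0
  | _ :: _ :: r => pairsInd r + 1

-- On an even-length list the two slices have equal length.
theorem slices_len_eq (xs : List Int) (h : xs.length % 2 = 0) :
    ((PySem.List.slice? xs (some 0) none 2).getD []).length =
      ((PySem.List.slice? xs (some 1) none 2).getD []).length := by
  induction xs using pairsInd.induct with
  | case1 => rfl
  | case2 a => simp at h
  | case3 a b r ih =>
    rw [sliceE_cons, sliceO_cons]
    simp only [List.length_cons]
    exact congrArg (· + 1) (ih (by simp only [List.length_cons] at h; omega))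

-- The list A's index loop sums is pointwise s[i] * (time-delta list zipWith (· - ·) t (0 :: t)).
theorem listA_eq (s t : List Int) (h : s.length = t.length) :
    (PySem.List.pyRange 0 (s.length : Int) 1).map
        (fun i => PySem.List.pyGetD s i 0 *
          (PySem.List.pyGetD t i 0 - (if 0 < i then PySem.List.pyGetD t (i - 1) 0 else 0)))
      = List.zipWith (· * ·) s (List.zipWith (· - ·) t (0 :: t)) := by
  apply List.ext_getElem
  · simp [PySem.List.length_pyRange_one]; omega
  · intro i h1 h2
    simp only [List.getElem_map, PySem.List.getElem_pyRange_one, List.getElem_zipWith, zero_add]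
    have hi : i < s.length := by simpa [PySem.List.length_pyRange_one] using h1
    have hit : i < t.length := h ▸ hi
    cases i with
    | zero =>
      rw [if_neg (by omega)]
      simp [PySem.List.pyGetD_ofNat', hi, hit]
    | succ k =>
      rw [if_pos (by exact_mod_cast Nat.succ_pos k)]
      have e1 : ((k+1 : Nat) : Int) - 1 = ((k : Nat) : Int) := by push_cast; ring
      have hk : k < t.length := by omega
      rw [e1, PySem.List.pyGetD_natCast s (k+1), PySem.List.pyGetD_natCast t (k+1),
        PySem.List.pyGetD_natCast t k]
      simp [hi, hit, hk]

-- The list B's enumerate loop sums is pointwise t[j] * (speed-drop list zipWith (· - ·) s (s.tail ++ [0])).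
theorem listB_eq (s t : List Int) (h : s.length = t.length) :
    (PySem.List.pyRange 0 (t.length : Int) 1).map
        (fun j => PySem.List.pyGetD t j 0 *
          (PySem.List.pyGetD s j 0 -
            (if j + 1 < (s.length : Int) then PySem.List.pyGetD s (j + 1) 0 else 0)))
      = List.zipWith (· * ·) t (List.zipWith (· - ·) s (s.tail ++ [0])) := by
  apply List.ext_getElem
  · simp [PySem.List.length_pyRange_one]
    cases s with
    | nil => rw [← h]; simp
    | cons a s' => rw [← h]; simp
  · intro i h1 h2
    simp only [List.getElem_map, PySem.List.getElem_pyRange_one, List.getElem_zipWith, zero_add]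
    have hit : i < t.length := by simpa [PySem.List.length_pyRange_one] using h1
    have his : i < s.length := h ▸ hit
    have e1 : ((i : Int) + 1) = ((i + 1 : Nat) : Int) := by push_cast; ring
    by_cases hc : i + 1 < s.length
    · rw [if_pos (by rw [e1]; exact_mod_cast hc), e1]
      have hgt : (s.tail ++ [0])[i]'(by simp [List.length_tail]; omega) = s[i+1] := by
        rw [List.getElem_append_left (by simp [List.length_tail]; omega)]
        simp [List.getElem_tail]
      rw [PySem.List.pyGetD_natCast t i, PySem.List.pyGetD_natCast s i,
        PySem.List.pyGetD_natCast s (i+1)]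
      simp [his, hit, hc, hgt]
    · rw [if_neg (by rw [e1]; exact_mod_cast hc)]
      have hgt : (s.tail ++ [0])[i]'(by simp [List.length_tail]; omega) = 0 := by
        rw [List.getElem_append_right (by simp [List.length_tail]; omega)]
        simp
      rw [PySem.List.pyGetD_natCast t i, PySem.List.pyGetD_natCast s i]
      simp [his, hit, hgt]

-- Summation by parts (telescoping): Σ s·Δt = Σ t·Δs − s₀·prev.
theorem telescope (s : List Int) : ∀ (t : List Int) (prev : Int), s.length = t.length →
    (List.zipWith (· * ·) s (List.zipWith (· - ·) t (prev :: t))).sum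
      = (List.zipWith (· * ·) t (List.zipWith (· - ·) s (s.tail ++ [0]))).sum
        - (s.headD 0) * prev := by
  induction s with
  | nil =>
    intro t prev h
    cases t with
    | nil => simp
    | cons b t' => simp at h
  | cons a s' ih =>
    intro t prev h
    cases t with
    | nil => simp at h
    | cons b t' =>
      have h' : s'.length = t'.length := by simpa using h
      have hz : List.zipWith (· - ·) (a :: s') (s' ++ [0]) =
          (a - s'.headD 0) :: List.zipWith (· - ·) s' (s'.tail ++ [0]) := by
        cases s' <;> simp
      simp only [List.zipWith_cons_cons, List.sum_cons, List.tail_cons, List.headD_cons, hz]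
      rw [ih t' b h']
      ring

-- ===== VERDICT (by name: the statement is the Claim_ definition above) =====
theorem odometer_spec : Claim_equal_odometer := by
  intro oksana _ hpre
  show odometer oksana = odometer_alt oksana
  unfold odometer odometer_alt
  rw [slice2_zero_eq, slice2_one_eq]
  set s := (PySem.List.slice? oksana (some 0) none 2).getD [] with hsdef
  set t := (PySem.List.slice? oksana (some 1) none 2).getD [] with htdef
  have hlen : s.length = t.length := slices_len_eq oksana hpre
  -- A's loop: drop the i == 0 special case, turn the fold into a sum, apply listA_eq
  rw [PySem.List.foldl_congr_mem _ _
    (fun d i => d + PySem.List.pyGetD s i 0 *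
      (PySem.List.pyGetD t i 0 -
        (if 0 < i then PySem.List.pyGetD t (i - 1) 0 else 0))) 0
    (by
      intro acc x hx
      rw [PySem.List.mem_pyRange_one] at hx
      by_cases hx0 : x = 0
      · simp [hx0]
      · have hpos : 0 < x := by omega
        simp [hx0, hpos])]
  rw [PySem.List.foldl_add]
  rw [listA_eq s t hlen]
  -- B's loop: turn the enumerate fold into a sum over indices, apply listB_eq
  rw [PySem.List.foldl_add
    (g := fun p : Int × Int => p.2 *
      (PySem.List.pyGetD s p.1 0 -
        (if p.1 + 1 < (s.length : Int) then PySem.List.pyGetD s (p.1 + 1) 0 else 0)))]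
  rw [PySem.List.enumerate_eq_map_pyRange (d := 0), List.map_map]
  simp only [PySem.List.len_eq, Function.comp_def]
  rw [listB_eq s t hlen]
  -- telescoping with initial time 0
  have htel := telescope s t 0 hlen
  simp only [mul_zero, sub_zero] at htel
  simpa using htel
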